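-- pv_equiv track=rewrite | github.com/InsN-Near/MAC-2024 | 1° Ano/1° Semestre/Lógica Digital e Robótica/Python/ConversãoDeSexagesimalParaDecimal.py | decimal_para_sexagesimal
-- ===== SOURCE A (Python) =====
-- def decimal_para_sexagesimal(decimal_num):
--     """Converte um número decimal para uma string sexagesimal."""
--     componentes = []
--     while decimal_num > 0:
--         componente = decimal_num % 60
--         componentes.append(componente)
--         decimal_num //= 60
--     sexagesimal_str = " ".join(str(x) for x in reversed(componentes))
--     return sexagesimal_str
-- ===== SOURCE B (Python) =====
-- def decimal_para_sexagesimal(decimal_num):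
--     """Converte um número decimal para uma string sexagesimal.
--
--     Recursive MSB-first formulation: the prefix (higher-order components)
--     is produced by the recursive call, so no list, reversal or join is needed.
--     """
--     if decimal_num <= 0:
--         return ""
--     prefix = decimal_para_sexagesimal(decimal_num // 60)
--     digit = str(decimal_num % 60)
--     return digit if prefix == "" else prefix + " " + digit
-- ===== Notes on version B (the rewrite author's own statement) =====
-- stated objective: simpler
-- what changed: Replaces the LSB-first loop that accumulates components into a list, reverses it and joins with spaces by a direct recursion that emits the most-significant component first via the recursive prefix, eliminating the list, the reversal and the join.
import Mathlib
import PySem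

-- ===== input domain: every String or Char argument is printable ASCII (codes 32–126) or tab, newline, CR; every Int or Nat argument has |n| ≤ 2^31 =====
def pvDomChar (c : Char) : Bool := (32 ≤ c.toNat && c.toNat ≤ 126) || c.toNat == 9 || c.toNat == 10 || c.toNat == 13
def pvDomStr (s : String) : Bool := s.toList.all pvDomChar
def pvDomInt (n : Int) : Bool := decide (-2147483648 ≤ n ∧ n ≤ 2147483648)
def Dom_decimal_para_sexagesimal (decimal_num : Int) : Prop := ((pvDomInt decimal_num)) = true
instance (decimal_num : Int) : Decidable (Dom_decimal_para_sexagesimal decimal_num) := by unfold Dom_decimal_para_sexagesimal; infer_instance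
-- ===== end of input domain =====

-- B replaces A's LSB-first accumulate/reverse/join loop by an MSB-first recursion (simpler decomposition; same cost).

-- ===== PORT A =====
-- pvALoop is the while-loop of A: it produces the components list LSB-first
-- (the cons recursion yields exactly the order A's list.append builds).
def pvALoop (decimal_num : Int) : List Int :=
  if h : 0 < decimal_num then
    PySem.Int.mod decimal_num 60 :: pvALoop (PySem.Int.floordiv decimal_num 60)
  else []
termination_by decimal_num.toNat
decreasing_by rw [PySem.Int.floordiv_eq_ediv_of_pos (by norm_num)]; omega

-- Python A: build components LSB-first, reverse, join with spaces.
def decimal_para_sexagesimal (decimal_num : Int) : String :=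
  PySem.Str.join " " ((pvALoop decimal_num).reverse.map PySem.Int.toStr)

-- ===== PORT B =====
def decimal_para_sexagesimal_alt (decimal_num : Int) : String :=
  if h : decimal_num ≤ 0 then ""
  else
    let pfx := decimal_para_sexagesimal_alt (PySem.Int.floordiv decimal_num 60)
    let digit := PySem.Int.toStr (PySem.Int.mod decimal_num 60)
    if pfx = "" then digit else pfx ++ " " ++ digit
termination_by decimal_num.toNat
decreasing_by rw [PySem.Int.floordiv_eq_ediv_of_pos (by norm_num)]; omega


-- ===== PRECONDITION & SPEC =====
def Spec_decimal_para_sexagesimal (decimal_num : Int) (out : String) : Prop := out = decimal_para_sexagesimal_alt decimal_num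
instance (decimal_num : Int) (out : String) : Decidable (Spec_decimal_para_sexagesimal decimal_num out) := by unfold Spec_decimal_para_sexagesimal; infer_instance

-- ===== CLAIM (what is proved, stated in full; the proofs are below) =====
def Claim_equal_decimal_para_sexagesimal : Prop := ∀ (decimal_num : Int), Dom_decimal_para_sexagesimal decimal_num → Spec_decimal_para_sexagesimal decimal_num (decimal_para_sexagesimal decimal_num)

-- ===== LEMMAS AND PROOFS =====
theorem tdc_len_le (b : Nat) : ∀ (fuel n : Nat) (ds : List Char),
    ds.length ≤ (Nat.toDigitsCore b fuel n ds).length := by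
  intro fuel
  induction fuel with
  | zero => intro n ds; simp [Nat.toDigitsCore]
  | succ f ih =>
    intro n ds
    simp only [Nat.toDigitsCore]
    split
    · simp
    · calc ds.length ≤ (ds.length + 1) := by omega
        _ = ((n % b).digitChar :: ds).length := by simp
        _ ≤ _ := ih _ _

theorem toDigits_ne_nil (b n : Nat) : Nat.toDigits b n ≠ [] := by
  unfold Nat.toDigits
  simp only [Nat.toDigitsCore]
  split
  · simp
  · intro h
    have := tdc_len_le b n (n / b) [(n % b).digitChar]
    rw [h] at this; simp at this

theorem toChars_ne_nil (n : Int) : PySem.Int.toChars n ≠ [] := by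
  unfold PySem.Int.toChars
  split
  · simp
  · exact toDigits_ne_nil _ _

theorem toStr_ne_empty (n : Int) : PySem.Int.toStr n ≠ "" := by
  intro h
  have h2 : (PySem.Int.toStr n).toList = ("" : String).toList := by rw [h]
  rw [PySem.Int.toList_toStr] at h2
  simp at h2
  exact toChars_ne_nil n h2

theorem join_append_singleton (sep y : List Char) :
    ∀ (xs : List (List Char)), xs ≠ [] →
      PySem.Chars.join sep (xs ++ [y]) = PySem.Chars.join sep xs ++ sep ++ y := by
  intro xs
  induction xs with
  | nil => intro h; exact absurd rfl h
  | cons x rest ih =>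
    intro _
    cases rest with
    | nil => simp [PySem.Chars.join_cons_cons, PySem.Chars.join_singleton]
    | cons z zs =>
      have e : (x :: z :: zs) ++ [y] = x :: z :: (zs ++ [y]) := by simp
      rw [e, PySem.Chars.join_cons_cons,
        show z :: (zs ++ [y]) = (z :: zs) ++ [y] from rfl, ih (by simp),
        PySem.Chars.join_cons_cons]
      simp

theorem str_join_singleton (sep x : String) : PySem.Str.join sep [x] = x := by
  simp [PySem.Str.join, PySem.Chars.join_singleton]

theorem str_join_append_singleton (sep y : String) (xs : List String) (h : xs ≠ []) :
    PySem.Str.join sep (xs ++ [y]) = PySem.Str.join sep xs ++ sep ++ y := by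
  simp only [PySem.Str.join, List.map_append, List.map_cons, List.map_nil]
  rw [join_append_singleton _ _ _ (by simpa using h)]
  apply String.toList_inj.mp
  simp

theorem str_join_ne_empty (sep x : String) (rest : List String) (hx : x ≠ "") :
    PySem.Str.join sep (x :: rest) ≠ "" := by
  intro h
  have h2 : (PySem.Str.join sep (x :: rest)).toList = [] := by rw [h]; rfl
  simp only [PySem.Str.join, List.map_cons] at h2
  rw [String.toList_ofList] at h2
  cases rest with
  | nil =>
    rw [List.map_nil, PySem.Chars.join_singleton] at h2
    exact hx (by apply String.toList_inj.mp; simp [h2])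
  | cons z zs =>
    rw [List.map_cons, PySem.Chars.join_cons_cons] at h2
    simp at h2
    exact hx (by apply String.toList_inj.mp; simp [h2.1])

theorem pvALoop_nil_iff (n : Int) : pvALoop n = [] ↔ n ≤ 0 := by
  rw [pvALoop]
  split <;> simp <;> omega

theorem alt_eq_join (n : Int) :
    decimal_para_sexagesimal_alt n
      = PySem.Str.join " " ((pvALoop n).reverse.map PySem.Int.toStr) := by
  fun_induction decimal_para_sexagesimal_alt n with
  | case1 n h =>
    rw [(pvALoop_nil_iff n).mpr h]
    rfl
  | case2 n h pfx digit hpfx ih =>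
    have hn' : pvALoop (PySem.Int.floordiv n 60) = [] := by
      by_contra hne
      cases hcl : pvALoop (PySem.Int.floordiv n 60) with
      | nil => exact hne hcl
      | cons m rest =>
        have : pfx ≠ "" := by
          show decimal_para_sexagesimal_alt (PySem.Int.floordiv n 60) ≠ ""
          rw [ih, hcl]
          simp only [List.reverse_cons, List.map_append, List.map_cons, List.map_nil]
          cases hrev : (rest.reverse.map PySem.Int.toStr) with
          | nil => simpa using str_join_ne_empty " " (PySem.Int.toStr m) [] (toStr_ne_empty m)
          | cons a as =>
            have := str_join_ne_empty " " a (as ++ [PySem.Int.toStr m]) ?_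
            · simpa [hrev] using this
            · have : a ∈ rest.reverse.map PySem.Int.toStr := by rw [hrev]; simp
              obtain ⟨v, _, hv⟩ := List.mem_map.mp this
              rw [← hv]; exact toStr_ne_empty v
        exact this hpfx
    show PySem.Int.toStr (PySem.Int.mod n 60) = _
    rw [pvALoop]
    rw [dif_pos (by omega), hn']
    simp only [List.reverse_cons, List.reverse_nil, List.nil_append, List.map_cons, List.map_nil]
    rw [str_join_singleton]
  | case3 n h pfx digit hpfx ih =>
    have hne : pvALoop (PySem.Int.floordiv n 60) ≠ [] := by
      intro hnil
      apply hpfx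
      show decimal_para_sexagesimal_alt (PySem.Int.floordiv n 60) = ""
      rw [ih, hnil]
      rfl
    show decimal_para_sexagesimal_alt (PySem.Int.floordiv n 60) ++ " " ++ PySem.Int.toStr (PySem.Int.mod n 60) = _
    rw [pvALoop, dif_pos (by omega)]
    simp only [List.reverse_cons, List.map_append, List.map_cons, List.map_nil]
    rw [str_join_append_singleton _ _ _ (by simpa using hne), ← ih]

-- ===== VERDICT (by name: the statement is the Claim_ definition above) =====
theorem decimal_para_sexagesimal_spec : Claim_equal_decimal_para_sexagesimal := by
  intro n _
  unfold Spec_decimal_para_sexagesimal decimal_para_sexagesimal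
  exact (alt_eq_join n).symm
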